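-- pv_equiv track=rewrite | github.com/akshatv07/email-automation | query_email_body.py | find_email_body_field
-- ===== SOURCE A (Python) =====
-- def find_email_body_field(fields):
--     """Find the email body field in the collection schema"""
--     # Common variations of email body field names
--     email_body_patterns = [
--         'email_body', 'body', 'emailbody', 'message_body',
--         'content', 'email_content', 'message', 'text'
--     ]
--
--     for pattern in email_body_patterns:
--         field = next((f for f in fields if pattern in f.lower()), None)
--         if field:
--             return field
--
--     return None
-- ===== SOURCE B (Python) =====
-- def find_email_body_field(fields):
--     """Find the email body field in the collection schema"""
--     email_body_patterns = [
--         'email_body', 'body', 'emailbody', 'message_body',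
--         'content', 'email_content', 'message', 'text'
--     ]
--     best = None  # (field, priority) with the smallest priority seen, first field on ties
--     for f in fields:
--         low = f.lower()
--         prio = next((i for i, p in enumerate(email_body_patterns) if p in low), None)
--         if prio is not None and (best is None or prio < best[1]):
--             best = (f, prio)
--     return best[0] if best is not None else None
-- ===== Notes on version B (the rewrite author's own statement) =====
-- stated objective: alternative
-- what changed: Inverts A's pattern-outer/field-inner scan into a single field-outer pass that computes each field's best pattern priority and keeps the field with the globally smallest priority (first in order on ties).
import Mathlib
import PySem

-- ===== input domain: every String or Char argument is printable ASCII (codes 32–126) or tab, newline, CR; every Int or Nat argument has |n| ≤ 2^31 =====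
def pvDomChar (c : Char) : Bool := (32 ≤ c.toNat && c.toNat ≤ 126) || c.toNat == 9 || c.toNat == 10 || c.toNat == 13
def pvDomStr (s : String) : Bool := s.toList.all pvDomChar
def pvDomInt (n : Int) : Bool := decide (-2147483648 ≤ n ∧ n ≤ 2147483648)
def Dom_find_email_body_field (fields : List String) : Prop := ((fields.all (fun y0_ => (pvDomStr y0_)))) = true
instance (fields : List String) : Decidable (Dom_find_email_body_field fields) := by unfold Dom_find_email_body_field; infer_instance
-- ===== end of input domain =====

-- B replaces A's pattern-outer/field-inner priority scan by a single field-outer pass keeping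
-- the field with the smallest per-field pattern priority (first field on ties): an alternative
-- decomposition of the same selection, not claimed faster.

-- ===== PORT A =====
def pvPats : List String :=
  ["email_body", "body", "emailbody", "message_body",
   "content", "email_content", "message", "text"]

-- `pattern in f.lower()`
def pvSub (p f : String) : Bool := PySem.Str.isIn p (PySem.Str.lower f)

-- the `for pattern in email_body_patterns` loop; `next((f for f in fields if …), None)` is
-- `fields.find?`, and `if field:` is the truthiness test (None or "" falls through)
def pvScanA : List String → List String → Option String
  | [], _ => none
  | p :: ps, fields =>
    match fields.find? (fun f => pvSub p f) with
    | some f => if f ≠ "" then some f else pvScanA ps fields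
    | none => pvScanA ps fields

def find_email_body_field (fields : List String) : Option String :=
  pvScanA pvPats fields

-- ===== PORT B =====
-- `next((i for i, p in enumerate(patterns) if p in low), None)`
def pvPrio (pats : List String) (f : String) : Option Nat :=
  pats.findIdx? (fun p => pvSub p f)

-- one iteration of B's loop over fields, state = best = None | (field, priority)
def pvStep (pats : List String) (s : Option (String × Nat)) (f : String) :
    Option (String × Nat) :=
  match pvPrio pats f with
  | none => s
  | some i =>
    match s with
    | none => some (f, i)
    | some (_, j) => if i < j then some (f, i) else s

def find_email_body_field_alt (fields : List String) : Option String :=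
  (fields.foldl (pvStep pvPats) none).map Prod.fst

-- ===== PRECONDITION & SPEC =====
def Spec_find_email_body_field (fields : List String) (out : Option String) : Prop := out = find_email_body_field_alt fields
instance (fields : List String) (out : Option String) : Decidable (Spec_find_email_body_field fields out) := by unfold Spec_find_email_body_field; infer_instance

-- ===== CLAIM (what is proved, stated in full; the proofs are below) =====
def Claim_equal_find_email_body_field : Prop := ∀ (fields : List String), Dom_find_email_body_field fields → Spec_find_email_body_field fields (find_email_body_field fields)

-- ===== LEMMAS AND PROOFS =====

-- state invariant through the part of the field list before the first match of the head pattern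
def pvInv (s : Option (String × Nat)) : Prop := ∀ g j, s = some (g, j) → 1 ≤ j

-- a (field, 0) state is never replaced (priorities are Nats, i < 0 is impossible)
theorem pv_absorb (pats : List String) (f : String) :
    ∀ fields : List String, fields.foldl (pvStep pats) (some (f, 0)) = some (f, 0) := by
  intro fields
  induction fields with
  | nil => rfl
  | cons g rest ih =>
      have hstep : pvStep pats (some (f, 0)) g = some (f, 0) := by
        unfold pvStep
        cases pvPrio pats g with
        | none => rfl
        | some i => simp
      simp [List.foldl, hstep, ih]

-- if the first field matching the head pattern is f, B's fold from an inv state ends in (f, 0)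
theorem pv_found (p : String) (ps : List String) :
    ∀ (fields : List String) (s : Option (String × Nat)) (f : String),
      fields.find? (fun g => pvSub p g) = some f → pvInv s →
      fields.foldl (pvStep (p :: ps)) s = some (f, 0) := by
  intro fields
  induction fields with
  | nil => intro s f h _; simp at h
  | cons g rest ih =>
      intro s f h hs
      by_cases hg : pvSub p g = true
      · have hf : f = g := by
          simp [hg] at h; exact h.symm
        have hprio : pvPrio (p :: ps) g = some 0 := by
          simp [pvPrio, List.findIdx?_cons, hg]
        have hstep : pvStep (p :: ps) s g = some (g, 0) := by
          unfold pvStep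
          rw [hprio]
          cases s with
          | none => rfl
          | some x =>
              obtain ⟨a0, b0⟩ := x
              have h0 := hs a0 b0 rfl
              have hpos : 0 < b0 := by omega
              simp [hpos]
        rw [hf]
        simp only [List.foldl, hstep]
        exact pv_absorb _ _ rest
      · have hg' : pvSub p g = false := by simpa using hg
        have hrest : rest.find? (fun x => pvSub p x) = some f := by
          simpa [List.find?_cons, hg'] using h
        have hprio : pvPrio (p :: ps) g = (pvPrio ps g).map (· + 1) := by
          simp [pvPrio, List.findIdx?_cons, hg']
        -- the new state still satisfies the invariant
        have hinv : pvInv (pvStep (p :: ps) s g) := by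
          unfold pvStep
          rw [hprio]
          cases hpg : pvPrio ps g with
          | none => simpa using hs
          | some i =>
              simp only [Option.map_some]
              cases s with
              | none => intro a b hab; simp at hab; omega
              | some x =>
                  obtain ⟨a0, b0⟩ := x
                  have h0 := hs a0 b0 rfl
                  by_cases hlt : i + 1 < b0
                  · intro a b hab; simp [hlt] at hab
                    obtain ⟨-, hb⟩ := hab; omega
                  · intro a b hab; simp [hlt] at hab
                    obtain ⟨-, hb⟩ := hab; omega
        simpa [List.foldl] using ih (pvStep (p :: ps) s g) f hrest hinv

-- shifting a pattern on the front adds 1 to every priority, which < preserves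
theorem pv_shift (p : String) (ps : List String) :
    ∀ (fields : List String) (s : Option (String × Nat)),
      (∀ g ∈ fields, pvSub p g = false) →
      fields.foldl (pvStep (p :: ps)) (s.map (fun x => (x.1, x.2 + 1))) =
        (fields.foldl (pvStep ps) s).map (fun x => (x.1, x.2 + 1)) := by
  intro fields
  induction fields with
  | nil => intro s _; rfl
  | cons g rest ih =>
      intro s hno
      have hg : pvSub p g = false := hno g (by simp)
      have hprio : pvPrio (p :: ps) g = (pvPrio ps g).map (· + 1) := by
        simp [pvPrio, List.findIdx?_cons, hg]
      have hstep : pvStep (p :: ps) (s.map (fun x => (x.1, x.2 + 1))) g =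
          (pvStep ps s g).map (fun x => (x.1, x.2 + 1)) := by
        unfold pvStep
        rw [hprio]
        cases pvPrio ps g with
        | none => rfl
        | some i =>
            cases s with
            | none => rfl
            | some x =>
                by_cases hlt : i < x.2
                · simp [hlt]
                · simp [hlt]
      simp only [List.foldl, hstep]
      exact ih (pvStep ps s g) (fun x hx => hno x (by simp [hx]))

-- a fold with an empty pattern list never changes the state
theorem pv_fold_nil (s : Option (String × Nat)) :
    ∀ fields : List String, fields.foldl (pvStep []) s = s := by
  intro fields
  induction fields generalizing s with
  | nil => rfl
  | cons g rest ih => simpa [List.foldl, pvStep, pvPrio] using ih s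

-- main bridge: A's pattern-outer scan equals B's field-outer fold, for any pattern list
-- whose patterns do not occur in the empty string
theorem pv_main :
    ∀ (ps fields : List String), (∀ p ∈ ps, pvSub p "" = false) →
      pvScanA ps fields = (fields.foldl (pvStep ps) none).map Prod.fst := by
  intro ps
  induction ps with
  | nil => intro fields _; simp [pvScanA, pv_fold_nil]
  | cons p ps ih =>
      intro fields hps
      cases hfind : fields.find? (fun g => pvSub p g) with
      | some f =>
          have hsub : pvSub p f = true := by
            have := List.find?_some hfind
            simpa using this
          have hne : f ≠ "" := by
            intro hf
            subst hf
            exact absurd hsub (by simp [hps p (by simp)])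
          have hfold : fields.foldl (pvStep (p :: ps)) none = some (f, 0) :=
            pv_found p ps fields none f hfind (by intro g j h; simp at h)
          simp [pvScanA, hfind, hne, hfold]
      | none =>
          have hno : ∀ g ∈ fields, pvSub p g = false := by
            intro g hg
            have := List.find?_eq_none.mp hfind g hg
            simpa using this
          have hshift := pv_shift p ps fields none hno
          simp only [Option.map_none] at hshift
          have hih := ih fields (fun q hq => hps q (by simp [hq]))
          simp only [pvScanA, hfind, hih, hshift, Option.map_map]
          rfl

-- ===== VERDICT (by name: the statement is the Claim_ definition above) =====
theorem find_email_body_field_spec : Claim_equal_find_email_body_field := by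
  intro fields _
  show find_email_body_field fields = find_email_body_field_alt fields
  unfold find_email_body_field find_email_body_field_alt
  exact pv_main pvPats fields (by decide)
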